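-- pv_equiv track=rewrite | github.com/PureCipher/xsecuremcp | src/fastmcp/reflexive/monitor.py | _assess_anomaly_severity
-- ===== SOURCE A (Python) =====
-- from typing import Any, Dict, List, Optional, Callable
--
-- def _assess_anomaly_severity(anomalies: List[Dict[str, Any]]) -> str:
--     """Assess the overall severity of anomalies."""
--     if not anomalies:
--         return "low"
--
--     severities = [a.get("severity", "low") for a in anomalies]
--
--     if "high" in severities:
--         return "high"
--     elif "medium" in severities:
--         return "medium"
--     else:
--         return "low"
-- ===== SOURCE B (Python) =====
-- from typing import Any, Dict, List
--
-- _RANK = {"high": 2, "medium": 1}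
-- _NAME = {2: "high", 1: "medium"}
--
-- def _assess_anomaly_severity(anomalies: List[Dict[str, Any]]) -> str:
--     """Assess the overall severity of anomalies."""
--     worst = max((_RANK.get(a.get("severity"), 0) for a in anomalies), default=0)
--     return _NAME.get(worst, "low")
-- ===== Notes on version B (the rewrite author's own statement) =====
-- stated objective: alternative
-- what changed: Replaces A's staged membership scans over an intermediate severities list with a numeric rank encoding: each anomaly is mapped to a rank (high=2, medium=1, else 0), the maximum rank is taken in one pass, and decoded back to a severity name.
import Mathlib
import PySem

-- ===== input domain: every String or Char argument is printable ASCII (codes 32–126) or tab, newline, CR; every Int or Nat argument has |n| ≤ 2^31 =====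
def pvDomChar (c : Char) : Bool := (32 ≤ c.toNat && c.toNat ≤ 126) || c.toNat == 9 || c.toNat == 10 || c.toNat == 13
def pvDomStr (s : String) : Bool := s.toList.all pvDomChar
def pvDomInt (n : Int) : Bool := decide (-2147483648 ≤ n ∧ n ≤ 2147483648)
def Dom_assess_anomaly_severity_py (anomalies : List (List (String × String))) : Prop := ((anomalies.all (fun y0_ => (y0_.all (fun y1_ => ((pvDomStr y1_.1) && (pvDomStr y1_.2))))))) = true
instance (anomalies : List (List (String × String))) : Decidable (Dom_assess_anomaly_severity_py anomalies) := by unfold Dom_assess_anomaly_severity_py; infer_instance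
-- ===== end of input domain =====

-- B re-encodes severities numerically (high=2, medium=1, else 0), takes the max rank in one pass and decodes it, instead of A's staged membership scans (objective: alternative).

-- ===== PORT A =====
def assess_anomaly_severity_py (anomalies : List (List (String × String))) : String :=
  if anomalies = [] then "low"
  else
    let severities := anomalies.map (fun a => (PySem.Dict.mk a).getD "severity" "low")
    if severities.contains "high" then "high"
    else if severities.contains "medium" then "medium"
    else "low"

-- ===== PORT B =====
-- _RANK.get(a.get("severity"), 0): a .get without default is Option; a None key never matches the str-keyed dict
def pvRankOf (a : List (String × String)) : Int :=
  match (PySem.Dict.mk a).get? "severity" with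
  | none => 0
  | some s => (PySem.Dict.mk [("high", (2 : Int)), ("medium", 1)]).getD s 0

def assess_anomaly_severity_py_alt (anomalies : List (List (String × String))) : String :=
  let worst := (PySem.List.max? (anomalies.map pvRankOf) (fun x => x)).getD 0
  (PySem.Dict.mk [((2 : Int), "high"), (1, "medium")]).getD worst "low"

-- ===== PRECONDITION & SPEC =====
def Spec_assess_anomaly_severity_py (anomalies : List (List (String × String))) (out : String) : Prop := out = assess_anomaly_severity_py_alt anomalies
instance (anomalies : List (List (String × String))) (out : String) : Decidable (Spec_assess_anomaly_severity_py anomalies out) := by unfold Spec_assess_anomaly_severity_py; infer_instance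

-- ===== CLAIM =====
def Claim_equal_assess_anomaly_severity_py : Prop := ∀ (anomalies : List (List (String × String))), Dom_assess_anomaly_severity_py anomalies → Spec_assess_anomaly_severity_py anomalies (assess_anomaly_severity_py anomalies)

-- ===== LEMMAS AND PROOFS =====

-- A's per-anomaly severity string
def pvSev (a : List (String × String)) : String := (PySem.Dict.mk a).getD "severity" "low"

-- the staged-scan result expressed as a rank
def pvT (l : List (List (String × String))) : Int :=
  if (l.map pvSev).contains "high" then 2
  else if (l.map pvSev).contains "medium" then 1 else 0

theorem pvRankOf_char (a : List (String × String)) :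
    pvRankOf a = (if pvSev a = "high" then 2 else if pvSev a = "medium" then 1 else 0) := by
  unfold pvRankOf pvSev PySem.Dict.getD
  cases h : (PySem.Dict.mk a).get? "severity" with
  | none => simp [h]
  | some s =>
    simp [h]
    by_cases hh : s = "high"
    · simp [hh]; decide
    · by_cases hm : s = "medium"
      · simp [hh, hm]; decide
      · have h1 : ("high" == s) = false := by simp [Ne.symm hh]
        have h2 : ("medium" == s) = false := by simp [Ne.symm hm]
        simp [PySem.Dict.get?, PySem.Dict.mk, h1, h2, hh, hm]

theorem pvRankOf_nonneg (a : List (String × String)) : 0 ≤ pvRankOf a := by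
  rw [pvRankOf_char]; split_ifs <;> omega

theorem pvT_bounds (l : List (List (String × String))) : 0 ≤ pvT l ∧ pvT l ≤ 2 := by
  unfold pvT; split_ifs <;> omega

theorem foldl_max_out (s : List Int) (x y : Int) :
    s.foldl max (max x y) = max x (s.foldl max y) := by
  induction s generalizing y with
  | nil => simp
  | cons h t ih => simp [List.foldl_cons, max_assoc, ih]

theorem foldl_max_rank (l : List (List (String × String))) (x : Int) (hx : 0 ≤ x) :
    (l.map pvRankOf).foldl max x = max x (pvT l) := by
  induction l generalizing x with
  | nil =>
    unfold pvT; simp; omega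
  | cons a t ih =>
    simp only [List.map_cons, List.foldl_cons]
    rw [ih (max x (pvRankOf a)) (le_max_of_le_left hx), max_assoc]
    congr 1
    have hb := pvT_bounds t
    rw [pvRankOf_char]
    unfold pvT
    simp only [List.map_cons, List.contains_cons]
    by_cases hh : pvSev a = "high"
    · simp [hh]
      split_ifs <;> omega
    · by_cases hm : pvSev a = "medium"
      · simp [hh, Ne.symm hh, hm]
        unfold pvT at hb
        split_ifs at hb ⊢ <;> omega
      · simp [hh, Ne.symm hh, hm, Ne.symm hm]
        unfold pvT at hb
        split_ifs at hb ⊢ <;> omega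

theorem worst_eq (l : List (List (String × String))) :
    (PySem.List.max? (l.map pvRankOf) (fun x => x)).getD 0 = pvT l := by
  cases l with
  | nil => unfold pvT; simp [PySem.List.max?]
  | cons a t =>
    simp only [List.map_cons, PySem.List.max?_id_cons, Option.getD_some]
    rw [show pvRankOf a = max (pvRankOf a) 0 from (max_eq_left (pvRankOf_nonneg a)).symm,
        foldl_max_out, foldl_max_rank t 0 le_rfl]
    have hb := pvT_bounds t
    have ha := pvRankOf_nonneg a
    have hc : pvT (a :: t) = max (pvRankOf a) (pvT t) := by
      rw [pvRankOf_char]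
      unfold pvT
      simp only [List.map_cons, List.contains_cons]
      by_cases hh : pvSev a = "high"
      · simp [hh]; split_ifs <;> omega
      · by_cases hm : pvSev a = "medium"
        · simp [hh, Ne.symm hh, hm]
          unfold pvT at hb; split_ifs at hb ⊢ <;> omega
        · simp [hh, Ne.symm hh, hm, Ne.symm hm]
          unfold pvT at hb; split_ifs at hb ⊢ <;> omega
    rw [hc]
    omega

-- ===== VERDICT =====
theorem assess_anomaly_severity_py_spec : Claim_equal_assess_anomaly_severity_py := by
  intro anomalies _
  unfold Spec_assess_anomaly_severity_py assess_anomaly_severity_py assess_anomaly_severity_py_alt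
  simp only [worst_eq]
  unfold pvT pvSev
  cases anomalies with
  | nil => simp; decide
  | cons a t =>
    simp only [if_neg (List.cons_ne_nil a t)]
    split_ifs <;> decide
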